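-- pv_equiv track=rewrite | github.com/NJ-Thomson/Oslo | VirtualScreen/Covalent/02_prepare_modeller_local.py | find_internal_gaps
-- ===== SOURCE A (Python) =====
-- def find_internal_gaps(residues_dict):
--     """Find gaps in residue numbering (missing loops)."""
--     if not residues_dict:
--         return [], None, None
--
--     res_nums = sorted(residues_dict.keys())
--     first_res = res_nums[0]
--     last_res = res_nums[-1]
--
--     gaps = []
--     for i in range(len(res_nums) - 1):
--         if res_nums[i + 1] - res_nums[i] > 1:
--             gap_start = res_nums[i] + 1
--             gap_end = res_nums[i + 1] - 1
--             gaps.append((gap_start, gap_end))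
--
--     return gaps, first_res, last_res
-- ===== SOURCE B (Python) =====
-- def find_internal_gaps(residues_dict):
--     """Find gaps in residue numbering (missing loops)."""
--     if not residues_dict:
--         return [], None, None
--     keys = set(residues_dict)
--     first = min(keys)
--     last = max(keys)
--     starts = sorted(n + 1 for n in keys if n != last and n + 1 not in keys)
--     ends = sorted(n - 1 for n in keys if n != first and n - 1 not in keys)
--     return list(zip(starts, ends)), first, last
-- ===== Notes on version B (the rewrite author's own statement) =====
-- stated objective: alternative
-- what changed: Instead of sorting the keys and scanning adjacent pairs, B takes min/max and collects gap left endpoints (present key whose successor is absent) and right endpoints (present key whose predecessor is absent) by set membership, sorts each boundary list and zips them into gaps.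
import Mathlib
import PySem

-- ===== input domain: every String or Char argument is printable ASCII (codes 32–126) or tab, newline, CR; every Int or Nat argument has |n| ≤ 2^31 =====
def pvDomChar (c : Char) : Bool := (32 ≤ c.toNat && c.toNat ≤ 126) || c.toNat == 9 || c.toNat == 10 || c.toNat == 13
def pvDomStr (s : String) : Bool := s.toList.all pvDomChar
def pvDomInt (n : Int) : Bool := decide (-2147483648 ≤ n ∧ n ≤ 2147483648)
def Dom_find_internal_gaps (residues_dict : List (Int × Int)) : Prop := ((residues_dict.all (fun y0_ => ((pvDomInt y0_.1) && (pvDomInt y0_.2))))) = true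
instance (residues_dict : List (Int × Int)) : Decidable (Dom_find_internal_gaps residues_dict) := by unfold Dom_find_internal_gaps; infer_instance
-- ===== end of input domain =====

-- B replaces A's sort-and-adjacent-pair scan by a set-membership boundary construction
-- (gap starts = keys whose successor is absent, gap ends = keys whose predecessor is
-- absent, each sorted and zipped); alternative algorithm of similar cost, no speed claim.

-- ===== PORT A =====
def find_internal_gaps (residues_dict : List (Int × Int)) : (List (Int × Int)) × Option Int × Option Int :=
  if residues_dict = [] then ([], none, none)
  else
    let res_nums := PySem.List.sorted (PySem.List.dedup (residues_dict.map Prod.fst)) (fun x => x) false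
    let first_res := PySem.List.pyGet? res_nums 0
    let last_res := PySem.List.pyGet? res_nums (-1)
    let gaps := (PySem.List.pyRange 0 ((res_nums.length : Int) - 1) 1).foldl
      (fun gaps i =>
        if PySem.List.pyGetD res_nums (i + 1) 0 - PySem.List.pyGetD res_nums i 0 > 1 then
          gaps ++ [(PySem.List.pyGetD res_nums i 0 + 1, PySem.List.pyGetD res_nums (i + 1) 0 - 1)]
        else gaps) []
    (gaps, first_res, last_res)

-- ===== PORT B =====
def find_internal_gaps_alt (residues_dict : List (Int × Int)) : (List (Int × Int)) × Option Int × Option Int :=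
  if residues_dict = [] then ([], none, none)
  else
    let keys : PySem.Set Int := PySem.Set.ofList (residues_dict.map Prod.fst)
    match PySem.List.min? keys (fun x => x), PySem.List.max? keys (fun x => x) with
    | some first, some last =>
      let starts := PySem.List.sorted
        ((keys.filter (fun n => !(n == last) && !(PySem.Set.contains keys (n + 1)))).map (fun n => n + 1))
        (fun x => x) false
      let ends := PySem.List.sorted
        ((keys.filter (fun n => !(n == first) && !(PySem.Set.contains keys (n - 1)))).map (fun n => n - 1))
        (fun x => x) false
      (starts.zip ends, some first, some last)
    | _, _ => ([], none, none)  -- unreachable: keys is nonempty here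

-- ===== PRECONDITION & SPEC =====
def Spec_find_internal_gaps (residues_dict : List (Int × Int)) (out : (List (Int × Int)) × Option Int × Option Int) : Prop := out = find_internal_gaps_alt residues_dict
instance (residues_dict : List (Int × Int)) (out : (List (Int × Int)) × Option Int × Option Int) : Decidable (Spec_find_internal_gaps residues_dict out) := by unfold Spec_find_internal_gaps; infer_instance

-- ===== CLAIM (what is proved, stated in full; the proofs are below) =====
def Claim_equal_find_internal_gaps : Prop := ∀ (residues_dict : List (Int × Int)), Dom_find_internal_gaps residues_dict → Spec_find_internal_gaps residues_dict (find_internal_gaps residues_dict)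

-- ===== LEMMAS AND PROOFS =====

-- A's adjacent-pair gap scan, as a structural recursion on the sorted key list.
def gapsRec : List Int → List (Int × Int)
  | a :: b :: t => (if b - a > 1 then [(a + 1, b - 1)] else []) ++ gapsRec (b :: t)
  | _ => []

lemma gapsRec_short (l : List Int) (h : l.length ≤ 1) : gapsRec l = [] := by
  match l, h with
  | [], _ => rfl
  | [a], _ => rfl

-- A's indexed fold over range(len-1) computes gapsRec of the suffix from index k.
lemma loopA_eq_gapsRec (xs : List Int) :
    ∀ (n k : Nat) (acc : List (Int × Int)), xs.length - k ≤ n →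
    (PySem.List.pyRange (k : Int) ((xs.length : Int) - 1) 1).foldl
      (fun gaps i =>
        if PySem.List.pyGetD xs (i + 1) 0 - PySem.List.pyGetD xs i 0 > 1 then
          gaps ++ [(PySem.List.pyGetD xs i 0 + 1, PySem.List.pyGetD xs (i + 1) 0 - 1)]
        else gaps) acc = acc ++ gapsRec (xs.drop k) := by
  intro n
  induction n with
  | zero =>
    intro k acc h
    rw [PySem.List.pyRange_one_eq_nil (by omega)]
    rw [gapsRec_short _ (by simp [List.length_drop]; omega)]
    simp
  | succ n ih =>
    intro k acc h
    by_cases hk : (k : Int) < (xs.length : Int) - 1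
    · have hk1 : k + 1 < xs.length := by omega
      have hk0 : k < xs.length := by omega
      rw [PySem.List.pyRange_one_cons hk]
      simp only [List.foldl_cons]
      have e1 : (k : Int) + 1 = ((k + 1 : Nat) : Int) := by push_cast; ring
      rw [e1, PySem.List.pyGetD_natCast, PySem.List.pyGetD_natCast]
      rw [ih (k + 1) _ (by omega)]
      have hdk : xs.drop k = xs[k] :: xs.drop (k + 1) := List.drop_eq_getElem_cons hk0
      have hdk1 : xs.drop (k + 1) = xs[k + 1] :: xs.drop (k + 2) := List.drop_eq_getElem_cons hk1
      rw [hdk, hdk1, gapsRec, ← hdk1]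
      rw [List.getD_eq_getElem xs 0 hk0, List.getD_eq_getElem xs 0 hk1]
      split_ifs <;> simp
    · rw [PySem.List.pyRange_one_eq_nil (by omega)]
      rw [gapsRec_short _ (by simp [List.length_drop]; omega)]
      simp

-- every element of a ≤-pairwise list is ≤ its last element
lemma le_getLast_of_pairwise : ∀ (s : List Int), s.Pairwise (· ≤ ·) →
    ∀ y ∈ s, y ≤ s.getLast?.getD 0 := by
  intro s
  induction s with
  | nil => intro _ y hy; simp at hy
  | cons a t ih =>
    intro hs y hy
    rcases List.pairwise_cons.mp hs with ⟨ha, ht⟩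
    cases t with
    | nil => simp at hy ⊢; omega
    | cons b u =>
      rw [List.getLast?_cons_cons]
      rcases List.mem_cons.mp hy with rfl | hy'
      · have hL : (b :: u).getLast? = some ((b :: u).getLast (by simp)) :=
          List.getLast?_eq_some_getLast (by simp)
        have hmem : (b :: u).getLast (by simp) ∈ b :: u := List.getLast_mem _
        have := ha _ hmem
        rw [hL]; simpa using this
      · exact ih ht y hy'

-- key combinatorial lemma: for a strictly increasing nonempty list, the adjacent-pair
-- gaps are the zip of successor-absent starts and predecessor-absent ends.
lemma gapsRec_eq_zip : ∀ (s : List Int) (last : Int), s.Pairwise (· < ·) →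
    last ∈ s → (∀ x ∈ s, x ≤ last) →
    gapsRec s =
      ((s.filter (fun n => decide (n ≠ last) && decide ((n + 1) ∉ s))).map (fun n => n + 1)).zip
      ((s.filter (fun n => decide (n ≠ s.headI) && decide ((n - 1) ∉ s))).map (fun n => n - 1)) := by
  intro s
  induction s with
  | nil => intro last _ hmem _; simp at hmem
  | cons a t ih =>
    intro last hs hmem hub
    rcases List.pairwise_cons.mp hs with ⟨ha, ht⟩
    cases t with
    | nil =>
      have : last = a := by simpa using hmem
      subst this
      simp [gapsRec]
    | cons b u =>
      have hab : a < b := ha b (by simp)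
      have hu : ∀ x ∈ u, b < x := (List.pairwise_cons.mp ht).1
      have hblast : b ≤ last := hub b (by simp)
      have hmem' : last ∈ b :: u := by
        rcases List.mem_cons.mp hmem with rfl | h
        · omega
        · exact h
      have hub' : ∀ x ∈ b :: u, x ≤ last := fun x hx => hub x (List.mem_cons_of_mem _ hx)
      have IH := ih last ht hmem' hub'
      -- starts decomposition
      have hane : a ≠ last := by omega
      have hstarts :
          List.filter (fun n => decide (n ≠ last) && decide ((n + 1) ∉ a :: b :: u)) (a :: b :: u)
          = (if b - a > 1 then [a] else []) ++
            List.filter (fun n => decide (n ≠ last) && decide ((n + 1) ∉ b :: u)) (b :: u) := by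
        have htail :
            List.filter (fun n => decide (n ≠ last) && decide ((n + 1) ∉ a :: b :: u)) (b :: u)
            = List.filter (fun n => decide (n ≠ last) && decide ((n + 1) ∉ b :: u)) (b :: u) := by
          apply List.filter_congr
          intro n hn
          have han : a < n := ha n hn
          have hiff : ((n + 1) ∈ a :: b :: u) ↔ ((n + 1) ∈ b :: u) := by
            constructor
            · intro h
              rcases List.mem_cons.mp h with h' | h'
              · omega
              · exact h'
            · exact fun h => List.mem_cons_of_mem _ h
          simp [hiff]
        rw [List.filter_cons, htail]
        by_cases hgap : b - a > 1
        · have hnot : (a + 1) ∉ a :: b :: u := by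
            intro h
            rcases List.mem_cons.mp h with h' | h'
            · omega
            · rcases List.mem_cons.mp h' with h'' | h''
              · omega
              · have := hu _ h''; omega
          rw [if_pos (by simp [hane, hnot]), if_pos hgap]
          rfl
        · have hyes : (a + 1) ∈ a :: b :: u := by
            have : b = a + 1 := by omega
            simp [this]
          rw [if_neg (by simp [hyes]), if_neg hgap]
          simp
      -- ends decomposition
      have hends :
          List.filter (fun n => decide (n ≠ a) && decide ((n - 1) ∉ a :: b :: u)) (a :: b :: u)
          = (if b - a > 1 then [b] else []) ++
            List.filter (fun n => decide (n ≠ b) && decide ((n - 1) ∉ b :: u)) (b :: u) := by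
        have htail :
            List.filter (fun n => decide (n ≠ a) && decide ((n - 1) ∉ a :: b :: u)) u
            = List.filter (fun n => decide (n ≠ b) && decide ((n - 1) ∉ b :: u)) u := by
          apply List.filter_congr
          intro n hn
          have hbn : b < n := hu n hn
          have hiff : ((n - 1) ∈ a :: b :: u) ↔ ((n - 1) ∈ b :: u) := by
            constructor
            · intro h
              rcases List.mem_cons.mp h with h' | h'
              · omega
              · exact h'
            · exact fun h => List.mem_cons_of_mem _ h
          have h1 : n ≠ a := by omega
          have h2 : n ≠ b := by omega
          simp [hiff, h1, h2]
        rw [List.filter_cons, if_neg (by simp)]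
        rw [List.filter_cons (x := b), htail]
        by_cases hgap : b - a > 1
        · have hnot : (b - 1) ∉ a :: b :: u := by
            intro h
            rcases List.mem_cons.mp h with h' | h'
            · omega
            · rcases List.mem_cons.mp h' with h'' | h''
              · omega
              · have := hu _ h''; omega
          rw [if_pos (by simp [hnot]; omega), if_pos hgap]
          · rw [List.filter_cons (x := b), if_neg (by simp)]
            rfl
        · have hyes : (b - 1) ∈ a :: b :: u := by
            have : b - 1 = a := by omega
            simp [this]
          rw [if_neg (by simp [hyes]), if_neg hgap]
          rw [List.filter_cons (x := b), if_neg (by simp)]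
          simp
      -- assemble
      show gapsRec (a :: b :: u) = _
      rw [gapsRec]
      have hheadI : (a :: b :: u).headI = a := rfl
      rw [hheadI, hstarts, hends, IH]
      by_cases hgap : b - a > 1
      · rw [if_pos hgap, if_pos hgap, if_pos hgap]
        simp [List.zip_cons_cons]
      · rw [if_neg hgap, if_neg hgap, if_neg hgap]
        simp

-- Pythons's xs[-1] on a nonempty list returns the last element
lemma pyGet_neg_one (s : List Int) (h : s ≠ []) : PySem.List.pyGet? s (-1) = s.getLast? := by
  have hlen : 0 < s.length := List.length_pos_iff.mpr h
  simp only [PySem.List.pyGet?, PySem.List.pyIdx?]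
  rw [if_neg (by omega), if_pos (by omega)]
  simp only [Option.bind_some, List.getLast?_eq_getElem?]
  norm_num

-- ===== VERDICT (by name: the statement is the Claim_ definition above) =====
theorem find_internal_gaps_spec : Claim_equal_find_internal_gaps := by
  intro d _
  unfold Spec_find_internal_gaps find_internal_gaps find_internal_gaps_alt
  by_cases hd : d = []
  · simp [hd]
  · rw [if_neg hd, if_neg hd]
    simp only [PySem.List.dedup_eq_ofList]
    set K : List Int := PySem.Set.ofList (d.map Prod.fst) with hK
    set s : List Int := PySem.List.sorted K (fun x => x) false with hs
    have hperm : s.Perm K := PySem.List.sorted_perm K _ _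
    have hpair : s.Pairwise (· < ·) := PySem.List.sorted_ofList_pairwise_lt _
    have hKne : K ≠ [] := by
      intro h0
      apply hd
      cases d with
      | nil => rfl
      | cons p q =>
        have : p.1 ∈ K := by
          rw [hK]; simp [pysem]
        rw [h0] at this; simp at this
    have hsne : s ≠ [] := by
      rw [hs]; simpa [PySem.List.sorted_eq_nil_iff] using hKne
    obtain ⟨a, t, hst⟩ := List.exists_cons_of_ne_nil hsne
    -- the minimum is the head of the sorted list
    obtain ⟨m, hm⟩ : ∃ m, PySem.List.min? K (fun x => x) = some m := by
      cases hmin : PySem.List.min? K (fun x => x) with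
      | none => exact absurd ((PySem.List.min?_eq_none_iff K _).mp hmin) hKne
      | some m => exact ⟨m, rfl⟩
    have hm_mem : m ∈ K := PySem.List.min?_mem hm
    have hma : m = a := by
      have h1 : ∀ y ∈ K, a ≤ y := PySem.List.key_head_sorted_le K (fun x => x) (hs ▸ hst)
      have h2 : ∀ y ∈ K, m ≤ y := PySem.List.min?_isMin hm
      have ha_mem : a ∈ K := hperm.mem_iff.mp (by rw [hst]; simp)
      exact le_antisymm (h2 a ha_mem) (h1 m hm_mem)
    -- the maximum is the last of the sorted list
    have hL : s.getLast? = some (s.getLast hsne) := List.getLast?_eq_some_getLast hsne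
    set L : Int := s.getLast hsne with hLdef
    have hL_mem_s : L ∈ s := List.getLast_mem hsne
    have hub_s : ∀ y ∈ s, y ≤ L := by
      intro y hy
      have := le_getLast_of_pairwise s (hpair.imp (fun h => le_of_lt h)) y hy
      rwa [hL] at this
    obtain ⟨M, hM⟩ : ∃ M, PySem.List.max? K (fun x => x) = some M := by
      cases hmax : PySem.List.max? K (fun x => x) with
      | none => exact absurd ((PySem.List.max?_eq_none_iff K _).mp hmax) hKne
      | some M => exact ⟨M, rfl⟩
    have hM_mem : M ∈ K := PySem.List.max?_mem hM
    have hML : M = L := by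
      have h2 : ∀ y ∈ K, y ≤ M := PySem.List.max?_isMax hM
      exact le_antisymm (hub_s M (hperm.mem_iff.mpr hM_mem))
        (h2 L (hperm.mem_iff.mp hL_mem_s))
    rw [hm, hM]
    -- contains over K equals membership in s
    have hcont : ∀ x : Int, (List.contains K x) = decide (x ∈ s) := by
      intro x
      rw [Bool.eq_iff_iff]
      simp [hperm.mem_iff]
    -- B's sorted starts list equals the filtered sorted key list
    have hstarts :
        PySem.List.sorted
          ((K.filter (fun n => !(n == M) && !(PySem.Set.contains K (n + 1)))).map (fun n => n + 1))
          (fun x => x) false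
        = (s.filter (fun n => decide (n ≠ M) && decide ((n + 1) ∉ s))).map (fun n => n + 1) := by
      apply PySem.List.sorted_eq_of_perm_of_pairwise_lt
      · have e1 : s.filter (fun n => decide (n ≠ M) && decide ((n + 1) ∉ s))
            = s.filter (fun n => !(n == M) && !(PySem.Set.contains K (n + 1))) := by
          apply List.filter_congr
          intro n _
          simp only [PySem.Set.contains, hcont]
          rw [Bool.eq_iff_iff]
          simp
        rw [e1]
        exact ((hperm.filter _).map _)
      · rw [List.pairwise_map]
        exact (hpair.filter _).imp (by intro x y h; omega)
    have hends :
        PySem.List.sorted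
          ((K.filter (fun n => !(n == m) && !(PySem.Set.contains K (n - 1)))).map (fun n => n - 1))
          (fun x => x) false
        = (s.filter (fun n => decide (n ≠ s.headI) && decide ((n - 1) ∉ s))).map (fun n => n - 1) := by
      apply PySem.List.sorted_eq_of_perm_of_pairwise_lt
      · have e1 : s.filter (fun n => decide (n ≠ s.headI) && decide ((n - 1) ∉ s))
            = s.filter (fun n => !(n == m) && !(PySem.Set.contains K (n - 1))) := by
          apply List.filter_congr
          intro n _
          simp only [PySem.Set.contains, hcont, hma, hst]
          rw [Bool.eq_iff_iff]
          simp
        rw [e1]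
        exact ((hperm.filter _).map _)
      · rw [List.pairwise_map]
        exact (hpair.filter _).imp (by intro x y h; omega)
    simp only [hstarts, hends]
    -- now the three components
    refine Prod.ext ?_ (Prod.ext ?_ ?_)
    · -- gaps
      show (PySem.List.pyRange 0 ((s.length : Int) - 1) 1).foldl _ [] = _
      have h0 : ((0 : Nat) : Int) = 0 := by norm_num
      have := loopA_eq_gapsRec s s.length 0 [] (by omega)
      rw [h0] at this
      rw [this]
      simp only [List.drop_zero, List.nil_append]
      exact gapsRec_eq_zip s M hpair
        (hML ▸ hL_mem_s) (hML ▸ hub_s)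
    · -- first
      show PySem.List.pyGet? s 0 = some m
      have h0 : (0 : Int) = ((0 : Nat) : Int) := by norm_num
      rw [h0, PySem.List.pyGet?_natCast, hst, hma]
      simp
    · -- last
      show PySem.List.pyGet? s (-1) = some M
      rw [pyGet_neg_one s hsne, hL, hML]
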